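-- pv_equiv track=rewrite | github.com/donia-lab/MetaBGC | MetaBGC-Development/metabgc/src/metabgcbuild.py | ungappedseqsearch
-- ===== SOURCE A (Python) =====
-- def ungappedseqsearch(reference_str, query_str):
--     for i in range(0, len(reference_str)):
--         if reference_str[i]=='-':
--             continue
--         k = i
--         j = 0
--         while j < len(query_str) and k < len(reference_str):
--             if query_str[j] == '-':
--                 j = j + 1
--             elif reference_str[k] == '-':
--                 k = k + 1
--             elif reference_str[k] != query_str[j]:
--                 break
--             else:
--                 k = k + 1
--                 j = j + 1
--         if j == len(query_str):
--             return [i, k]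
--     return [-1, -1]
-- ===== SOURCE B (Python) =====
-- def ungappedseqsearch(reference_str, query_str):
--     keep = [(i, c) for i, c in enumerate(reference_str) if c != '-']
--     q = ''.join(c for c in query_str if c != '-')
--     if not q:
--         return [keep[0][0], keep[0][0]] if keep else [-1, -1]
--     r = ''.join(c for _, c in keep)
--     t = r.find(q)
--     if t == -1:
--         return [-1, -1]
--     return [keep[t][0], keep[t + len(q) - 1][0] + 1]
-- ===== Notes on version B (the rewrite author's own statement) =====
-- stated objective: faster
-- what changed: A rescans the reference from every start position with interleaved dash-skipping (O(n*m)); B builds the (index, char) list of non-dash reference characters once, strips the query, finds the leftmost occurrence with one str.find, and maps the stripped position back to original indices.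
-- intended difference: When the query has a dash after its last non-dash character and the stripped query's only occurrence in the stripped reference ends exactly at the final character of the reference (which is not a dash), A returns [-1, -1] because its inner loop refuses to consume the trailing query dash at the end of the reference, while B returns the match [start, end]; B's value is intended since trailing gap columns should not affect a gap-insensitive search. — e.g. on ungappedseqsearch("ab", "b-"): A returns [-1, -1], B returns [1, 2]
import Mathlib
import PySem

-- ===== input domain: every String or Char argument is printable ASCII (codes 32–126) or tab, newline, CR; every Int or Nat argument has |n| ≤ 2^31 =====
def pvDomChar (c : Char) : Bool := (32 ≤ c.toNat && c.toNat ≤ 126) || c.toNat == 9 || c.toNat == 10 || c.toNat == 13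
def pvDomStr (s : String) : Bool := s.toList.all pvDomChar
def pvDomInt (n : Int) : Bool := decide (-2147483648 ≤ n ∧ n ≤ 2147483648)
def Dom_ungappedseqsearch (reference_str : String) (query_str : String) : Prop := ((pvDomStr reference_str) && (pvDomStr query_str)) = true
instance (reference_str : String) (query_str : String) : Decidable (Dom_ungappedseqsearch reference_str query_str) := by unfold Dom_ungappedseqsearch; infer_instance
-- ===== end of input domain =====

-- B strips the gaps once and uses a single substring search over the stripped reference,
-- mapping the stripped position back through a precomputed index list (faster: one pass
-- instead of a rescan from every start position); intended difference on trailing-dash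
-- queries is stated as D_ below.


-- ===== PORT A =====
-- A's inner while loop: state (k, j), branches in A's order; the first Nat is fuel
-- (a pure totality guard, always called with enough fuel for the loop measure).
def pvAInner (r q : List Char) : Nat → Nat → Nat → Nat × Nat
  | 0, k, j => (k, j)
  | fuel + 1, k, j =>
    if j < q.length ∧ k < r.length then
      if q.getD j ' ' = '-' then pvAInner r q fuel k (j + 1)
      else if r.getD k ' ' = '-' then pvAInner r q fuel (k + 1) j
      else if r.getD k ' ' ≠ q.getD j ' ' then (k, j)
      else pvAInner r q fuel (k + 1) (j + 1)
    else (k, j)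

-- A's outer for loop over i (first Nat is fuel for the remaining iterations).
def pvALoop (r q : List Char) : Nat → Nat → List Int
  | 0, _ => [-1, -1]
  | fuel + 1, i =>
    if i < r.length then
      if r.getD i ' ' = '-' then pvALoop r q fuel (i + 1)
      else
        let kj := pvAInner r q (q.length + (r.length - i)) i 0
        if kj.2 = q.length then [(i : Int), (kj.1 : Int)] else pvALoop r q fuel (i + 1)
    else [-1, -1]

def ungappedseqsearch (reference_str : String) (query_str : String) : List Int :=
  pvALoop reference_str.toList query_str.toList (reference_str.toList.length + 1) 0

-- ===== PORT B =====
def ungappedseqsearch_alt (reference_str : String) (query_str : String) : List Int :=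
  let keep := (PySem.List.enumerate reference_str.toList).filter (fun p => p.2 ≠ '-')
  let q := String.ofList (query_str.toList.filter (fun c => c ≠ '-'))
  if q = "" then
    match keep with
    | [] => [-1, -1]
    | p :: _ => [p.1, p.1]
  else
    let r := String.ofList (keep.map (fun p => p.2))
    let t := PySem.Str.find r q
    if t = -1 then [-1, -1]
    else [(keep.getD t.toNat (0, ' ')).1, (keep.getD (t.toNat + q.toList.length - 1) (0, ' ')).1 + 1]

-- ===== PRECONDITION & SPEC =====
-- When the query has a dash after its last non-dash character and the stripped query's only
-- occurrence in the stripped reference ends exactly at the final (non-dash) character of the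
-- reference, A returns [-1, -1] (its inner loop cannot consume the trailing query dash at the
-- end of the reference) while B returns the match; B's value is the intended one.
def D_ungappedseqsearch (reference_str : String) (query_str : String) : Prop :=
  let rs := reference_str.toList.filter (· ≠ '-')
  let qs := query_str.toList.filter (· ≠ '-')
  qs ≠ [] ∧ query_str.toList.getLast? = some '-' ∧ reference_str.toList.getLast? ≠ some '-' ∧
    qs.length ≤ rs.length ∧ PySem.Chars.find rs qs = (rs.length : Int) - (qs.length : Int)
instance (reference_str : String) (query_str : String) : Decidable (D_ungappedseqsearch reference_str query_str) := by
  unfold D_ungappedseqsearch; infer_instance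

def Spec_ungappedseqsearch (reference_str : String) (query_str : String) (out : List Int) : Prop :=
  ¬ D_ungappedseqsearch reference_str query_str → out = ungappedseqsearch_alt reference_str query_str
instance (reference_str : String) (query_str : String) (out : List Int) : Decidable (Spec_ungappedseqsearch reference_str query_str out) := by
  unfold Spec_ungappedseqsearch; infer_instance

def pvDiffWitness_ungappedseqsearch : String × String := ("ab", "b-")
def pvDiffWitnessOut_ungappedseqsearch : (List Int) × (List Int) := ([-1, -1], [1, 2])

-- ===== CLAIM (what is proved, stated in full; the proofs are below) =====
def Claim_unchanged_ungappedseqsearch : Prop := ∀ (reference_str : String) (query_str : String), Dom_ungappedseqsearch reference_str query_str → Spec_ungappedseqsearch reference_str query_str (ungappedseqsearch reference_str query_str)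
def Claim_changed_ungappedseqsearch : Prop := Dom_ungappedseqsearch (pvDiffWitness_ungappedseqsearch.1) (pvDiffWitness_ungappedseqsearch.2) ∧ D_ungappedseqsearch (pvDiffWitness_ungappedseqsearch.1) (pvDiffWitness_ungappedseqsearch.2) ∧ ungappedseqsearch (pvDiffWitness_ungappedseqsearch.1) (pvDiffWitness_ungappedseqsearch.2) = pvDiffWitnessOut_ungappedseqsearch.1 ∧ ungappedseqsearch_alt (pvDiffWitness_ungappedseqsearch.1) (pvDiffWitness_ungappedseqsearch.2) = pvDiffWitnessOut_ungappedseqsearch.2 ∧ pvDiffWitnessOut_ungappedseqsearch.1 ≠ pvDiffWitnessOut_ungappedseqsearch.2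
def Claim_exact_ungappedseqsearch : Prop := ∀ (reference_str : String) (query_str : String), Dom_ungappedseqsearch reference_str query_str → D_ungappedseqsearch reference_str query_str → ungappedseqsearch reference_str query_str ≠ ungappedseqsearch_alt reference_str query_str

-- ===== LEMMAS AND PROOFS =====

-- Suffix-level twin of A's inner loop: returns (#ref chars consumed, #query chars consumed).
def pvInner2 : List Char → List Char → Nat × Nat
  | _, [] => (0, 0)
  | [], _ :: _ => (0, 0)
  | rc :: rt, qc :: qt =>
    if qc = '-' then
      let ab := pvInner2 (rc :: rt) qt
      (ab.1, ab.2 + 1)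
    else if rc = '-' then
      let ab := pvInner2 rt (qc :: qt)
      (ab.1 + 1, ab.2)
    else if rc ≠ qc then (0, 0)
    else
      let ab := pvInner2 rt qt
      (ab.1 + 1, ab.2 + 1)
termination_by R Q => R.length + Q.length

-- keep-pairs of a char list, indices starting at n.
def pvKp : List Char → Nat → List (Nat × Char)
  | [], _ => []
  | c :: R, n => if c = '-' then pvKp R (n + 1) else (n, c) :: pvKp R (n + 1)

theorem pvKp_snd (R : List Char) (n : Nat) : (pvKp R n).map (·.2) = R.filter (· ≠ '-') := by
  induction R generalizing n with
  | nil => rfl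
  | cons c R ih =>
    by_cases hc : c = '-' <;> simp [pvKp, hc, ih]

theorem pvKp_length (R : List Char) (n : Nat) : (pvKp R n).length = (R.filter (· ≠ '-')).length := by
  have := congrArg List.length (pvKp_snd R n)
  simpa using this

theorem pvKp_mem (R : List Char) (n : Nat) (p : Nat × Char) (hp : p ∈ pvKp R n) :
    n ≤ p.1 ∧ p.1 - n < R.length ∧ R.getD (p.1 - n) ' ' = p.2 ∧ p.2 ≠ '-' := by
  induction R generalizing n with
  | nil => simp [pvKp] at hp
  | cons c R ih =>
    by_cases hc : c = '-'
    · simp only [pvKp, if_pos hc] at hp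
      have := ih (n + 1) hp
      obtain ⟨h1, h2, h3, h4⟩ := this
      refine ⟨by omega, by simp; omega, ?_, h4⟩
      have hne : p.1 - n = (p.1 - (n + 1)) + 1 := by omega
      rw [hne]; simpa using h3
    · simp only [pvKp, if_neg hc, List.mem_cons] at hp
      rcases hp with hp | hp
      · subst hp; simp [hc]
      · have := ih (n + 1) hp
        obtain ⟨h1, h2, h3, h4⟩ := this
        refine ⟨by omega, by simp; omega, ?_, h4⟩
        have hne : p.1 - n = (p.1 - (n + 1)) + 1 := by omega
        rw [hne]; simpa using h3

theorem pvKp_sorted (R : List Char) (n : Nat) : (pvKp R n).Pairwise (fun p q => p.1 < q.1) := by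
  induction R generalizing n with
  | nil => simp [pvKp]
  | cons c R ih =>
    by_cases hc : c = '-'
    · simpa [pvKp, hc] using ih (n + 1)
    · simp only [pvKp, if_neg hc]
      refine List.Pairwise.cons ?_ (ih (n + 1))
      intro p hp
      have := pvKp_mem R (n + 1) p hp
      omega

theorem pvKp_shift_one (R : List Char) (n : Nat) :
    pvKp R (n + 1) = (pvKp R n).map (fun p => (p.1 + 1, p.2)) := by
  induction R generalizing n with
  | nil => rfl
  | cons c R ih =>
    by_cases hc : c = '-' <;> simp [pvKp, hc, ih]

theorem pvKp_shift (R : List Char) (n : Nat) :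
    pvKp R n = (pvKp R 0).map (fun p => (p.1 + n, p.2)) := by
  induction n with
  | zero => simp
  | succ n ih =>
    rw [pvKp_shift_one, ih, List.map_map]
    apply List.map_congr_left
    intro p _
    simp; omega

theorem pvKp_split (R : List Char) (n d : Nat) :
    pvKp R n = pvKp (R.take d) n ++ pvKp (R.drop d) (n + d) := by
  induction R generalizing n d with
  | nil => simp [pvKp]
  | cons c R ih =>
    cases d with
    | zero => simp [pvKp]
    | succ d =>
      by_cases hc : c = '-' <;>
        simp [pvKp, hc, ih (n + 1) d, Nat.add_assoc, Nat.add_comm 1 d]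

theorem pvKp_mem_complete (R : List Char) (n i : Nat) (hi : i < R.length) (hnd : R.getD i ' ' ≠ '-') :
    (n + i, R.getD i ' ') ∈ pvKp R n := by
  induction R generalizing n i with
  | nil => simp at hi
  | cons c R ih =>
    cases i with
    | zero => simp only [List.getD] at hnd ⊢; simp [pvKp, hnd]; simp at hnd; simp [hnd]
    | succ i =>
      have hi' : i < R.length := by simpa using hi
      have hnd' : R.getD i ' ' ≠ '-' := by simpa using hnd
      have := ih (n + 1) i hi' hnd'
      by_cases hc : c = '-' <;> simp [pvKp, hc] <;>
        first
          | (simpa [Nat.add_assoc, Nat.add_comm 1 i] using this)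
          | (right; simpa [Nat.add_assoc, Nat.add_comm 1 i] using this)

theorem pvKp_complete (R : List Char) (i : Nat) (hi : i < R.length) (hnd : R.getD i ' ' ≠ '-') :
    ∃ s, ∃ h : s < (pvKp R 0).length, ((pvKp R 0)[s]).1 = i := by
  have hmem : (i, R.getD i ' ') ∈ pvKp R 0 := by
    have := pvKp_mem_complete R 0 i hi hnd
    simpa using this
  obtain ⟨s, hs, hEq⟩ := List.getElem_of_mem hmem
  exact ⟨s, hs, by rw [hEq]⟩

theorem pvKp_fst_lt (R : List Char) (n : Nat) {a b : Nat} (ha : a < (pvKp R n).length)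
    (hb : b < (pvKp R n).length) (hab : a < b) : ((pvKp R n)[a]).1 < ((pvKp R n)[b]).1 :=
  (List.pairwise_iff_getElem.mp (pvKp_sorted R n)) a b ha hb hab

-- dropping the reference at the s-th kept index shifts the keep list
theorem pvKp_drop (R : List Char) (s : Nat) (h : s < (pvKp R 0).length) :
    (pvKp (R.drop ((pvKp R 0)[s]).1) 0).map (fun p => (p.1 + ((pvKp R 0)[s]).1, p.2)) =
      (pvKp R 0).drop s := by
  set i := ((pvKp R 0)[s]).1 with hi
  have hmem : (pvKp R 0)[s] ∈ pvKp R 0 := List.getElem_mem h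
  obtain ⟨-, hlt, hgd, hnd⟩ := pvKp_mem R 0 _ hmem
  simp only [Nat.sub_zero] at hlt hgd
  have hdropR : R.drop i = ((pvKp R 0)[s]).2 :: R.drop (i + 1) := by
    rw [List.drop_eq_getElem_cons hlt]
    congr 1
    rw [← hgd, List.getD_eq_getElem _ _ hlt]
  have hsecond : pvKp (R.drop i) i = (i, ((pvKp R 0)[s]).2) :: pvKp (R.drop (i + 1)) (i + 1) := by
    rw [hdropR]; simp [pvKp, hnd]
  have hsplit := pvKp_split R 0 i
  rw [Nat.zero_add] at hsplit
  set first := pvKp (R.take i) 0 with hfirstdef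
  have hKa : ∀ hh : first.length < (pvKp R 0).length, ((pvKp R 0)[first.length]'hh).1 = i := by
    intro hh
    rw [List.getElem_of_eq hsplit, List.getElem_append_right (by omega)]
    simp [hsecond]
  have hlen : (pvKp R 0).length = first.length + (pvKp (R.drop i) i).length := by
    rw [hsplit]; simp
  have hflen : first.length < (pvKp R 0).length := by
    rw [hlen, hsecond]; simp
  have hfs : first.length = s := by
    rcases Nat.lt_trichotomy first.length s with hc | hc | hc
    · have := pvKp_fst_lt R 0 hflen h hc
      rw [hKa hflen] at this; omega
    · exact hc
    · have := pvKp_fst_lt R 0 h hflen hc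
      rw [hKa hflen] at this; omega
  have hdropK : (pvKp R 0).drop s = pvKp (R.drop i) i := by
    rw [hsplit, ← hfs, List.drop_left]
  rw [hdropK, pvKp_shift (R.drop i) i]

-- dash-only lists
theorem pvFilter_ne_nil_ne {l : List Char} (h : l.filter (· ≠ '-') ≠ []) : l ≠ [] := by
  intro hl; rw [hl] at h; exact h rfl

theorem pvLast_cons {α : Type} {a : α} {l : List α} (h : l ≠ []) : (a :: l).getLast? = l.getLast? := by
  cases l with
  | nil => exact absurd rfl h
  | cons b m => simp

theorem pvAllDash {l : List Char} (h : l.filter (· ≠ '-') = []) (hne : l ≠ []) :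
    l.getLast? = some '-' := by
  rw [List.getLast?_eq_getLast hne]
  have hmem := List.getLast_mem hne
  have := List.filter_eq_nil_iff.mp h _ hmem
  simp at this
  rw [this]

-- the inner loop on a query with no real characters
theorem pvInner2_gaps (R Q : List Char) (hq : Q.filter (· ≠ '-') = []) :
    pvInner2 R Q = (0, if R = [] then 0 else Q.length) := by
  induction Q with
  | nil => cases R <;> simp [pvInner2]
  | cons qc qt ih =>
    have hqc : qc = '-' := by
      by_contra hcc
      simp [List.filter_cons, hcc] at hq
    have hqt : qt.filter (· ≠ '-') = [] := by
      simpa [List.filter_cons, hqc] using hq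
    cases R with
    | nil => simp [pvInner2]
    | cons rc rt => simp [pvInner2, hqc, ih hqt]

-- characterization of the inner loop when the stripped query is nonempty:
-- it consumes the whole query iff the stripped query is a prefix of the stripped
-- reference and (when the query ends in a dash) the match does not end flush with
-- the end of the reference; on success the count of consumed reference characters
-- is one past the index of the last matched kept character.
theorem pvInner2_char (N : Nat) : ∀ (R Q : List Char), R.length + Q.length ≤ N →
    Q.filter (· ≠ '-') ≠ [] →
    ((pvInner2 R Q).2 = Q.length ↔
      (Q.filter (· ≠ '-') <+: R.filter (· ≠ '-') ∧
        (Q.getLast? = some '-' →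
          ((pvKp R 0).getD ((Q.filter (· ≠ '-')).length - 1) (0, ' ')).1 + 1 < R.length))) ∧
    ((pvInner2 R Q).2 = Q.length →
      (pvInner2 R Q).1 = ((pvKp R 0).getD ((Q.filter (· ≠ '-')).length - 1) (0, ' ')).1 + 1) := by
  induction N with
  | zero =>
    intro R Q hlen hq
    have : Q = [] := by
      cases Q with
      | nil => rfl
      | cons a b => simp at hlen
    rw [this] at hq; simp at hq
  | succ N ih =>
    intro R Q hlen hq
    cases Q with
    | nil => simp at hq
    | cons qc qt =>
      cases R with
      | nil =>
        constructor
        · constructor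
          · intro hfalse; simp [pvInner2] at hfalse
          · rintro ⟨hpre, -⟩
            exact absurd (List.prefix_nil.mp (by simpa using hpre)) hq
        · intro hfalse; simp [pvInner2] at hfalse
      | cons rc rt =>
        by_cases hqc : qc = '-'
        · -- query head is a dash: consume it
          have hqt : qt.filter (· ≠ '-') ≠ [] := by simpa [List.filter_cons, hqc] using hq
          have hqtne : qt ≠ [] := pvFilter_ne_nil_ne hqt
          obtain ⟨ihiff, ihval⟩ := ih (rc :: rt) qt
            (by simp only [List.length_cons] at hlen ⊢; omega) hqt
          have hfil : (qc :: qt).filter (· ≠ '-') = qt.filter (· ≠ '-') := by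
            simp [List.filter_cons, hqc]
          have hlast : (qc :: qt).getLast? = qt.getLast? := pvLast_cons hqtne
          have hstep : pvInner2 (rc :: rt) (qc :: qt) =
              ((pvInner2 (rc :: rt) qt).1, (pvInner2 (rc :: rt) qt).2 + 1) := by
            simp [pvInner2, hqc]
          rw [hstep, hfil, hlast]
          constructor
          · rw [List.length_cons, Nat.add_right_cancel_iff]
            exact ihiff
          · intro hsucc
            rw [List.length_cons, Nat.add_right_cancel_iff] at hsucc
            exact ihval hsucc
        · by_cases hrc : rc = '-'
          · -- reference head is a dash: skip it
            obtain ⟨ihiff, ihval⟩ := ih rt (qc :: qt)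
              (by simp only [List.length_cons] at hlen ⊢; omega) hq
            have hstep : pvInner2 (rc :: rt) (qc :: qt) =
                ((pvInner2 rt (qc :: qt)).1 + 1, (pvInner2 rt (qc :: qt)).2) := by
              simp [pvInner2, hqc, hrc]
            have hfilR : (rc :: rt).filter (· ≠ '-') = rt.filter (· ≠ '-') := by
              simp [List.filter_cons, hrc]
            have hK : pvKp (rc :: rt) 0 = (pvKp rt 0).map (fun p => (p.1 + 1, p.2)) := by
              simp [pvKp, hrc]
              exact pvKp_shift_one rt 0
            set m := ((qc :: qt).filter (· ≠ '-')).length with hm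
            have hmpos : 0 < m := by
              rw [hm]; exact List.length_pos_of_ne_nil hq
            have hidx : (qc :: qt).filter (· ≠ '-') <+: rt.filter (· ≠ '-') →
                ((pvKp (rc :: rt) 0).getD (m - 1) (0, ' ')).1 =
                  ((pvKp rt 0).getD (m - 1) (0, ' ')).1 + 1 := by
              intro hpre
              have h2 : m ≤ (rt.filter (· ≠ '-')).length := by
                rw [hm]; exact hpre.length_le
              have hr : m - 1 < (pvKp rt 0).length := by rw [pvKp_length]; omega
              rw [hK, List.getD_eq_getElem _ _ (by simpa using hr), List.getD_eq_getElem _ _ hr]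
              simp
            rw [hstep, hfilR]
            constructor
            · rw [ihiff]
              constructor
              · rintro ⟨hpre, hcond⟩
                refine ⟨hpre, fun hl => ?_⟩
                rw [hidx hpre]
                have := hcond hl
                simp only [List.length_cons]
                omega
              · rintro ⟨hpre, hcond⟩
                refine ⟨hpre, fun hl => ?_⟩
                have := hcond hl
                rw [hidx hpre] at this
                simp only [List.length_cons] at this
                omega
            · intro hsucc
              have hpre := (ihiff.mp hsucc).1
              rw [ihval hsucc, hidx hpre]
          · by_cases hmatch : rc = qc
            · -- heads match
              have hstep : pvInner2 (rc :: rt) (qc :: qt) =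
                  ((pvInner2 rt qt).1 + 1, (pvInner2 rt qt).2 + 1) := by
                simp [pvInner2, hqc, hrc, hmatch]
              have hfilQ : (qc :: qt).filter (· ≠ '-') = qc :: qt.filter (· ≠ '-') := by
                simp [List.filter_cons, hqc]
              have hfilR : (rc :: rt).filter (· ≠ '-') = rc :: rt.filter (· ≠ '-') := by
                simp [List.filter_cons, hrc]
              have hK : pvKp (rc :: rt) 0 = (0, rc) :: (pvKp rt 0).map (fun p => (p.1 + 1, p.2)) := by
                simp [pvKp, hrc]
                exact pvKp_shift_one rt 0
              by_cases hqt : qt.filter (· ≠ '-') = []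
              · -- rest of the query has no real characters: m = 1
                have hg := pvInner2_gaps rt qt hqt
                rw [hstep, hfilQ, hfilR, hqt, hK, hg]
                simp only [List.length_cons, List.length_nil, Nat.zero_add, Nat.sub_self,
                  List.getD_cons_zero]
                constructor
                · constructor
                  · intro hs
                    refine ⟨List.cons_prefix_cons.mpr ⟨hmatch.symm, List.nil_prefix⟩, fun hl => ?_⟩
                    by_cases hrt : rt = []
                    · -- then the success equation forces qt = [], contradicting the trailing dash
                      rw [hrt] at hs
                      simp at hs
                      have hqtnil : qt = [] := by simpa using hs.symm
                      rw [hqtnil] at hl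
                      simp at hl
                      exact absurd hl hqc
                    · have := List.length_pos_of_ne_nil hrt
                      omega
                  · rintro ⟨-, hcond⟩
                    by_cases hqtnil : qt = []
                    · rw [hqtnil]; simp
                    · have hl : (qc :: qt).getLast? = some '-' := by
                        rw [pvLast_cons hqtnil]
                        exact pvAllDash hqt hqtnil
                      have := hcond hl
                      simp only [List.length_cons] at this
                      have hrt : rt ≠ [] := by
                        intro hh; rw [hh] at this; simp at this
                      simp [hrt]
                · intro hs
                  simp [hg]
              · -- general case: induction on the tails
                obtain ⟨ihiff, ihval⟩ := ih rt qt
                  (by simp only [List.length_cons] at hlen ⊢; omega) hqt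
                have hqtne : qt ≠ [] := pvFilter_ne_nil_ne hqt
                have hlast : (qc :: qt).getLast? = qt.getLast? := pvLast_cons hqtne
                set m' := (qt.filter (· ≠ '-')).length with hm'
                have hm'pos : 0 < m' := by rw [hm']; exact List.length_pos_of_ne_nil hqt
                have hidx : qt.filter (· ≠ '-') <+: rt.filter (· ≠ '-') →
                    ((pvKp (rc :: rt) 0).getD (m' + 1 - 1) (0, ' ')).1 =
                      ((pvKp rt 0).getD (m' - 1) (0, ' ')).1 + 1 := by
                  intro hpre
                  have h2 : m' ≤ (rt.filter (· ≠ '-')).length := by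
                    rw [hm']; exact hpre.length_le
                  have hr : m' - 1 < (pvKp rt 0).length := by rw [pvKp_length]; omega
                  rw [hK]
                  have he : m' + 1 - 1 = (m' - 1) + 1 := by omega
                  rw [he, List.getD_cons_succ,
                    List.getD_eq_getElem _ _ (by simpa using hr), List.getD_eq_getElem _ _ hr]
                  simp
                rw [hstep, hfilQ, hfilR, hlast]
                simp only [List.length_cons]
                constructor
                · constructor
                  · intro hs
                    have hs' : (pvInner2 rt qt).2 = qt.length := by omega
                    obtain ⟨hpre, hcond⟩ := ihiff.mp hs'
                    refine ⟨List.cons_prefix_cons.mpr ⟨hmatch.symm, hpre⟩, fun hl => ?_⟩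
                    rw [hidx hpre]
                    have := hcond hl
                    omega
                  · rintro ⟨hpre, hcond⟩
                    have hpre' := (List.cons_prefix_cons.mp hpre).2
                    have : (pvInner2 rt qt).2 = qt.length := by
                      refine ihiff.mpr ⟨hpre', fun hl => ?_⟩
                      have := hcond hl
                      rw [hidx hpre'] at this
                      omega
                    omega
                · intro hs
                  have hs' : (pvInner2 rt qt).2 = qt.length := by omega
                  obtain ⟨hpre, -⟩ := ihiff.mp hs'
                  rw [ihval hs', hidx hpre]
            · -- mismatch: break
              have hstep : pvInner2 (rc :: rt) (qc :: qt) = (0, 0) := by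
                simp [pvInner2, hqc, hrc, hmatch]
              rw [hstep]
              constructor
              · constructor
                · intro h0; simp at h0
                · rintro ⟨hpre, -⟩
                  simp [List.filter_cons, hqc, hrc] at hpre
                  exact absurd hpre.1.symm hmatch
              · intro h0; simp at h0

-- A's inner loop only looks at the suffixes r.drop k, q.drop j
theorem pvInner2_nil_left (Q : List Char) : pvInner2 [] Q = (0, 0) := by
  cases Q <;> simp [pvInner2]

theorem pvInner2_nil_right (R : List Char) : pvInner2 R [] = (0, 0) := by
  cases R <;> simp [pvInner2]

theorem pvInner2_cons_qdash (rc : Char) (rt qt : List Char) :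
    pvInner2 (rc :: rt) ('-' :: qt) =
      ((pvInner2 (rc :: rt) qt).1, (pvInner2 (rc :: rt) qt).2 + 1) := by
  simp [pvInner2]

theorem pvInner2_cons_rdash (rt : List Char) (qc : Char) (qt : List Char) (hq : qc ≠ '-') :
    pvInner2 ('-' :: rt) (qc :: qt) =
      ((pvInner2 rt (qc :: qt)).1 + 1, (pvInner2 rt (qc :: qt)).2) := by
  simp [pvInner2, hq]

theorem pvInner2_cons_match (rt qt : List Char) (c : Char) (hc : c ≠ '-') :
    pvInner2 (c :: rt) (c :: qt) = ((pvInner2 rt qt).1 + 1, (pvInner2 rt qt).2 + 1) := by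
  simp [pvInner2, hc]

theorem pvInner2_cons_mismatch (rc qc : Char) (rt qt : List Char)
    (h1 : qc ≠ '-') (h2 : rc ≠ '-') (h3 : rc ≠ qc) :
    pvInner2 (rc :: rt) (qc :: qt) = (0, 0) := by
  simp [pvInner2, h1, h2, h3]

theorem pvAInner_eq (N : Nat) : ∀ (r q : List Char) (k j : Nat), k ≤ r.length → j ≤ q.length →
    q.length - j + (r.length - k) ≤ N →
    pvAInner r q N k j = (k + (pvInner2 (r.drop k) (q.drop j)).1, j + (pvInner2 (r.drop k) (q.drop j)).2) := by
  induction N with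
  | zero =>
    intro r q k j hk hj hN
    have hjl : j = q.length := by omega
    have hdq : q.drop j = [] := by rw [hjl, List.drop_length]
    rw [hdq, pvInner2_nil_right]
    simp [pvAInner]
  | succ N ih =>
    intro r q k j hk hj hN
    show (if j < q.length ∧ k < r.length then
      if q.getD j ' ' = '-' then pvAInner r q N k (j + 1)
      else if r.getD k ' ' = '-' then pvAInner r q N (k + 1) j
      else if r.getD k ' ' ≠ q.getD j ' ' then (k, j)
      else pvAInner r q N (k + 1) (j + 1)
    else (k, j)) = _
    by_cases h : j < q.length ∧ k < r.length
    · obtain ⟨hjlt, hklt⟩ := h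
      rw [if_pos ⟨hjlt, hklt⟩]
      have hdq : q.drop j = q[j] :: q.drop (j + 1) := List.drop_eq_getElem_cons hjlt
      have hdr : r.drop k = r[k] :: r.drop (k + 1) := List.drop_eq_getElem_cons hklt
      have hgq : q.getD j ' ' = q[j] := List.getD_eq_getElem q ' ' hjlt
      have hgr : r.getD k ' ' = r[k] := List.getD_eq_getElem r ' ' hklt
      have hb1 : q.length - (j + 1) + (r.length - k) ≤ N := by omega
      have hb2 : q.length - j + (r.length - (k + 1)) ≤ N := by omega
      have hb3 : q.length - (j + 1) + (r.length - (k + 1)) ≤ N := by omega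
      rw [hgq, hgr]
      by_cases hq1 : q[j] = '-'
      · rw [if_pos hq1, ih r q k (j + 1) hk (by omega) hb1]
        conv_rhs => rw [hdq, hdr, hq1, pvInner2_cons_qdash, ← hdr]
        simp <;> omega
      · rw [if_neg hq1]
        by_cases hr1 : r[k] = '-'
        · rw [if_pos hr1, ih r q (k + 1) j (by omega) hj hb2]
          conv_rhs => rw [hdq, hdr, hr1, pvInner2_cons_rdash _ _ _ hq1, ← hdq]
          simp <;> omega
        · by_cases hne : r[k] = q[j]
          · rw [if_neg hr1, if_neg (show ¬(r[k] ≠ q[j]) from by simpa using hne),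
              ih r q (k + 1) (j + 1) (by omega) (by omega) hb3]
            conv_rhs => rw [hdq, hdr, hne, pvInner2_cons_match _ _ _ (hne ▸ hr1)]
            simp <;> omega
          · rw [if_neg hr1, if_pos hne]
            conv_rhs => rw [hdq, hdr, pvInner2_cons_mismatch _ _ _ _ hq1 hr1 hne]
            simp
    · rw [if_neg h]
      rcases Nat.lt_or_ge j q.length with hj' | hj'
      · have hkl : k = r.length := by omega
        have hdrk : r.drop k = [] := by rw [hkl, List.drop_length]
        rw [hdrk, pvInner2_nil_left]
        simp
      · have hjl : j = q.length := by omega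
        have hdq : q.drop j = [] := by rw [hjl, List.drop_length]
        rw [hdq, pvInner2_nil_right]
        simp

-- A's outer loop: first hit wins
theorem pvALoop_hit (r q : List Char) (N : Nat) : ∀ (i s0 : Nat) (h0 : s0 < (pvKp r 0).length),
    r.length - i < N →
    i ≤ ((pvKp r 0)[s0]).1 →
    (pvInner2 (r.drop ((pvKp r 0)[s0]).1) q).2 = q.length →
    (∀ s, (hs : s < (pvKp r 0).length) → ((pvKp r 0)[s]).1 < ((pvKp r 0)[s0]).1 →
      (pvInner2 (r.drop ((pvKp r 0)[s]).1) q).2 ≠ q.length) →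
    pvALoop r q N i = [((((pvKp r 0)[s0]).1 : Nat) : Int),
      (((((pvKp r 0)[s0]).1 + (pvInner2 (r.drop ((pvKp r 0)[s0]).1) q).1 : Nat)) : Int)] := by
  induction N with
  | zero =>
    intro i s0 h0 hN hi hsucc hmin
    exfalso
    omega
  | succ N ih =>
    intro i s0 h0 hN hi hsucc hmin
    obtain ⟨-, hlt0, hgd0, hnd0⟩ := pvKp_mem r 0 _ (List.getElem_mem h0)
    simp only [Nat.sub_zero] at hlt0 hgd0
    have hilen : i < r.length := by omega
    show (if i < r.length then
      if r.getD i ' ' = '-' then pvALoop r q N (i + 1)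
      else
        if (pvAInner r q (q.length + (r.length - i)) i 0).2 = q.length then
          [(i : Int), ((pvAInner r q (q.length + (r.length - i)) i 0).1 : Int)]
        else pvALoop r q N (i + 1)
    else [-1, -1]) = _
    rw [if_pos hilen]
    by_cases hdash : r.getD i ' ' = '-'
    · rw [if_pos hdash]
      have hne : i ≠ ((pvKp r 0)[s0]).1 := by
        intro hEq; rw [hEq, hgd0] at hdash; exact hnd0 hdash
      exact ih (i + 1) s0 h0 (by omega) (by omega) hsucc hmin
    · rw [if_neg hdash]
      obtain ⟨s, hs, hsi⟩ := pvKp_complete r i hilen hdash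
      have hInner := pvAInner_eq (q.length + (r.length - i)) r q i 0 (by omega) (by omega) (by omega)
      simp only [List.drop_zero] at hInner
      by_cases hEq : i = ((pvKp r 0)[s0]).1
      · have hsnd : (pvAInner r q (q.length + (r.length - i)) i 0).2 = q.length := by
          rw [hInner]
          simp only []
          rw [hEq, hsucc]
          omega
        rw [if_pos hsnd, hInner, hEq]
      · have hlt : i < ((pvKp r 0)[s0]).1 := by omega
        have hfail := hmin s hs (by omega)
        have hsnd : (pvAInner r q (q.length + (r.length - i)) i 0).2 ≠ q.length := by
          rw [hInner]
          rw [hsi] at hfail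
          simpa using hfail
        rw [if_neg hsnd]
        exact ih (i + 1) s0 h0 (by omega) (by omega) hsucc hmin

-- A's outer loop: no hit at all
theorem pvALoop_miss (r q : List Char) (N : Nat) : ∀ i,
    (∀ s, (hs : s < (pvKp r 0).length) → i ≤ ((pvKp r 0)[s]).1 →
      (pvInner2 (r.drop ((pvKp r 0)[s]).1) q).2 ≠ q.length) →
    pvALoop r q N i = [-1, -1] := by
  induction N with
  | zero =>
    intro i hfail
    rfl
  | succ N ih =>
    intro i hfail
    show (if i < r.length then
      if r.getD i ' ' = '-' then pvALoop r q N (i + 1)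
      else
        if (pvAInner r q (q.length + (r.length - i)) i 0).2 = q.length then
          [(i : Int), ((pvAInner r q (q.length + (r.length - i)) i 0).1 : Int)]
        else pvALoop r q N (i + 1)
    else [-1, -1]) = _
    by_cases hilen : i < r.length
    · rw [if_pos hilen]
      by_cases hdash : r.getD i ' ' = '-'
      · rw [if_pos hdash]
        exact ih (i + 1) (fun s hs hle => hfail s hs (by omega))
      · rw [if_neg hdash]
        obtain ⟨s, hs, hsi⟩ := pvKp_complete r i hilen hdash
        have hInner := pvAInner_eq (q.length + (r.length - i)) r q i 0 (by omega) (by omega) (by omega)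
        simp only [List.drop_zero] at hInner
        have hf := hfail s hs (by omega)
        have hsnd : (pvAInner r q (q.length + (r.length - i)) i 0).2 ≠ q.length := by
          rw [hInner]
          rw [hsi] at hf
          simpa using hf
        rw [if_neg hsnd]
        exact ih (i + 1) (fun s hs hle => hfail s hs (by omega))
    · rw [if_neg hilen]

-- the last kept pair of a reference that does not end in a dash
theorem pvKp_last (R : List Char) (n : Nat) (hne : R ≠ []) (hl : R.getLast? ≠ some '-') :
    ∃ c, (pvKp R n).getLast? = some (n + R.length - 1, c) := by
  induction R generalizing n with
  | nil => exact absurd rfl hne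
  | cons a R ih =>
    by_cases hRnil : R = []
    · subst hRnil
      have ha : a ≠ '-' := by simpa using hl
      exact ⟨a, by simp [pvKp, ha]⟩
    · have hlR : R.getLast? ≠ some '-' := by rwa [pvLast_cons hRnil] at hl
      obtain ⟨c, hc⟩ := ih n.succ hRnil hlR
      refine ⟨c, ?_⟩
      have hkpne : pvKp R (n + 1) ≠ [] := by intro hh; rw [hh] at hc; simp at hc
      by_cases ha : a = '-'
      · simp only [pvKp, if_pos ha, List.length_cons]
        rw [show (Nat.succ n) = n + 1 from rfl] at hc
        rw [hc, show n + 1 + R.length - 1 = n + (R.length + 1) - 1 from by omega]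
      · simp only [pvKp, if_neg ha, List.length_cons]
        rw [show (Nat.succ n) = n + 1 from rfl] at hc
        rw [pvLast_cons hkpne, hc, show n + 1 + R.length - 1 = n + (R.length + 1) - 1 from by omega]

theorem pvDropFilter (r : List Char) (s : Nat) (h : s < (pvKp r 0).length) :
    (r.drop ((pvKp r 0)[s]).1).filter (· ≠ '-') = (r.filter (· ≠ '-')).drop s := by
  calc (r.drop ((pvKp r 0)[s]).1).filter (· ≠ '-')
      = (pvKp (r.drop ((pvKp r 0)[s]).1) 0).map (·.2) := (pvKp_snd _ 0).symm
    _ = ((pvKp (r.drop ((pvKp r 0)[s]).1) 0).map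
          (fun p => (p.1 + ((pvKp r 0)[s]).1, p.2))).map (·.2) := by
        simp [List.map_map]
    _ = ((pvKp r 0).drop s).map (·.2) := by rw [pvKp_drop r s h]
    _ = ((pvKp r 0).map (·.2)).drop s := by rw [List.map_drop]
    _ = (r.filter (· ≠ '-')).drop s := by rw [pvKp_snd]

theorem pvDropIdx (r : List Char) (s j : Nat) (hs : s < (pvKp r 0).length)
    (h : s + j < (pvKp r 0).length) :
    ((pvKp (r.drop ((pvKp r 0)[s]).1) 0).getD j (0, ' ')).1 + ((pvKp r 0)[s]).1 =
      (((pvKp r 0).getD (s + j) (0, ' '))).1 := by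
  have hd := pvKp_drop r s hs
  have hlen : (pvKp (r.drop ((pvKp r 0)[s]).1) 0).length = (pvKp r 0).length - s := by
    have := congrArg List.length hd
    simpa using this
  have hj : j < (pvKp (r.drop ((pvKp r 0)[s]).1) 0).length := by omega
  rw [List.getD_eq_getElem _ _ hj, List.getD_eq_getElem _ _ h]
  have h2 := List.getElem_of_eq hd (show j < ((pvKp (r.drop ((pvKp r 0)[s]).1) 0).map
      (fun p => (p.1 + ((pvKp r 0)[s]).1, p.2))).length by simpa using hj)
  rw [List.getElem_map] at h2
  rw [List.getElem_drop] at h2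
  exact congrArg Prod.fst h2

-- success of A's scan from the s-th kept position, phrased against the stripped strings
theorem pvSucc_iff (r q : List Char) (s : Nat) (hs : s < (pvKp r 0).length)
    (hq : q.filter (· ≠ '-') ≠ []) :
    ((pvInner2 (r.drop ((pvKp r 0)[s]).1) q).2 = q.length ↔
      (q.filter (· ≠ '-') <+: (r.filter (· ≠ '-')).drop s ∧
        (q.getLast? = some '-' →
          ((pvKp r 0).getD (s + (q.filter (· ≠ '-')).length - 1) (0, ' ')).1 + 1 < r.length))) ∧
    ((pvInner2 (r.drop ((pvKp r 0)[s]).1) q).2 = q.length →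
      ((pvKp r 0)[s]).1 + (pvInner2 (r.drop ((pvKp r 0)[s]).1) q).1 =
        ((pvKp r 0).getD (s + (q.filter (· ≠ '-')).length - 1) (0, ' ')).1 + 1) := by
  obtain ⟨-, hlt, -, -⟩ := pvKp_mem r 0 _ (List.getElem_mem hs)
  simp only [Nat.sub_zero] at hlt
  obtain ⟨chiff, chval⟩ := pvInner2_char ((r.drop ((pvKp r 0)[s]).1).length + q.length)
    (r.drop ((pvKp r 0)[s]).1) q le_rfl hq
  rw [pvDropFilter r s hs] at chiff
  set i := ((pvKp r 0)[s]).1 with hidef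
  set m := (q.filter (· ≠ '-')).length with hm
  have hmpos : 0 < m := List.length_pos_of_ne_nil hq
  have hKlen : (pvKp r 0).length = (r.filter (· ≠ '-')).length := pvKp_length r 0
  have htrans : q.filter (· ≠ '-') <+: (r.filter (· ≠ '-')).drop s →
      (((pvKp (r.drop i) 0).getD (m - 1) (0, ' ')).1 + 1 < (r.drop i).length ↔
        ((pvKp r 0).getD (s + m - 1) (0, ' ')).1 + 1 < r.length) := by
    intro hpre
    have hlp : m ≤ ((r.filter (· ≠ '-')).drop s).length := hpre.length_le
    rw [List.length_drop] at hlp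
    have hrange : s + (m - 1) < (pvKp r 0).length := by omega
    have hixEq := pvDropIdx r s (m - 1) hs hrange
    have harith : s + (m - 1) = s + m - 1 := by omega
    rw [harith] at hixEq
    rw [← hidef] at hixEq
    rw [List.length_drop]
    omega
  constructor
  · rw [chiff]
    constructor
    · rintro ⟨hpre, hcond⟩
      exact ⟨hpre, fun hl => (htrans hpre).mp (hcond hl)⟩
    · rintro ⟨hpre, hcond⟩
      exact ⟨hpre, fun hl => (htrans hpre).mpr (hcond hl)⟩
  · intro hsucc
    have hpre := (chiff.mp hsucc).1
    have hlp : m ≤ ((r.filter (· ≠ '-')).drop s).length := hpre.length_le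
    rw [List.length_drop] at hlp
    have hrange : s + (m - 1) < (pvKp r 0).length := by omega
    have hixEq := pvDropIdx r s (m - 1) hs hrange
    have harith : s + (m - 1) = s + m - 1 := by omega
    rw [harith] at hixEq
    rw [← hidef] at hixEq
    rw [chval hsucc]
    omega

theorem pvKeep (R : List Char) (n : Nat) :
    (PySem.List.enumerate R (n : Int)).filter (fun p => p.2 ≠ '-') =
      (pvKp R n).map (fun p => ((p.1 : Int), p.2)) := by
  induction R generalizing n with
  | nil => simp [PySem.List.enumerate_nil, pvKp]
  | cons c R ih =>
    rw [PySem.List.enumerate_cons]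
    have hcast : (n : Int) + 1 = ((n + 1 : Nat) : Int) := by push_cast; ring
    by_cases hc : c = '-'
    · rw [List.filter_cons]
      simp only [hc]
      simp only [pvKp, if_pos rfl]
      rw [hcast, ih (n + 1)]
      simp
    · rw [List.filter_cons]
      simp only [pvKp, if_neg hc]
      rw [hcast, ih (n + 1)]
      simp [hc]

theorem pvGetD_map_cast (K : List (Nat × Char)) (n : Nat) :
    ((K.map (fun p => ((p.1 : Int), p.2))).getD n ((0 : Int), ' ')).1 =
      ((K.getD n (0, ' ')).1 : Int) := by
  by_cases h : n < K.length
  · rw [List.getD_eq_getElem _ _ (by simpa using h), List.getD_eq_getElem _ _ h]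
    simp
  · rw [List.getD_eq_default _ _ (by simpa using h), List.getD_eq_default _ _ (by omega)]
    simp

theorem pvFind_bridge (A B : List Char) :
    PySem.Str.find (String.ofList A) (String.ofList B) = PySem.Chars.find A B := by
  simp

theorem pvOfList_ne_empty {l : List Char} (h : l ≠ []) : String.ofList l ≠ "" := by
  intro hh
  have := congrArg String.toList hh
  simp at this
  exact h this

-- the four observable branches of B
theorem pvAlt_gaps_nil (ref q : String) (hqs : q.toList.filter (· ≠ '-') = [])
    (hK : pvKp ref.toList 0 = []) : ungappedseqsearch_alt ref q = [-1, -1] := by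
  have hKeep := pvKeep ref.toList 0
  simp only [Nat.cast_zero] at hKeep
  simp only [ungappedseqsearch_alt]
  rw [hKeep, hK, hqs]
  simp

theorem pvAlt_gaps_cons (ref q : String) (p : Nat × Char) (rest : List (Nat × Char))
    (hqs : q.toList.filter (· ≠ '-') = [])
    (hK : pvKp ref.toList 0 = p :: rest) :
    ungappedseqsearch_alt ref q = [(p.1 : Int), (p.1 : Int)] := by
  have hKeep := pvKeep ref.toList 0
  simp only [Nat.cast_zero] at hKeep
  simp only [ungappedseqsearch_alt]
  rw [hKeep, hK, hqs]
  simp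

theorem pvAlt_find_neg (ref q : String) (hqs : q.toList.filter (· ≠ '-') ≠ [])
    (hfind : PySem.Chars.find (ref.toList.filter (· ≠ '-')) (q.toList.filter (· ≠ '-')) = -1) :
    ungappedseqsearch_alt ref q = [-1, -1] := by
  have hKeep := pvKeep ref.toList 0
  simp only [Nat.cast_zero] at hKeep
  simp only [ungappedseqsearch_alt]
  rw [hKeep]
  rw [if_neg (pvOfList_ne_empty hqs)]
  rw [List.map_map]
  have hsnd : ((pvKp ref.toList 0).map ((fun p => p.2) ∘ (fun p => ((p.1 : Int), p.2)))) =
      ref.toList.filter (· ≠ '-') := by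
    rw [show ((fun (p : Int × Char) => p.2) ∘ (fun (p : Nat × Char) => ((p.1 : Int), p.2))) =
      (fun (p : Nat × Char) => p.2) from rfl]
    exact pvKp_snd ref.toList 0
  rw [hsnd]
  rw [pvFind_bridge, hfind]
  simp

theorem pvAlt_find_pos (ref q : String) (hqs : q.toList.filter (· ≠ '-') ≠ [])
    (hfind : PySem.Chars.find (ref.toList.filter (· ≠ '-')) (q.toList.filter (· ≠ '-')) ≠ -1) :
    ungappedseqsearch_alt ref q =
      [(((pvKp ref.toList 0).getD (PySem.Chars.find (ref.toList.filter (· ≠ '-'))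
          (q.toList.filter (· ≠ '-'))).toNat (0, ' ')).1 : Int),
       (((pvKp ref.toList 0).getD ((PySem.Chars.find (ref.toList.filter (· ≠ '-'))
          (q.toList.filter (· ≠ '-'))).toNat + (q.toList.filter (· ≠ '-')).length - 1) (0, ' ')).1 : Int) + 1] := by
  have hKeep := pvKeep ref.toList 0
  simp only [Nat.cast_zero] at hKeep
  simp only [ungappedseqsearch_alt]
  rw [hKeep]
  rw [if_neg (pvOfList_ne_empty hqs)]
  rw [List.map_map]
  have hsnd : ((pvKp ref.toList 0).map ((fun p => p.2) ∘ (fun p => ((p.1 : Int), p.2)))) =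
      ref.toList.filter (· ≠ '-') := by
    rw [show ((fun (p : Int × Char) => p.2) ∘ (fun (p : Nat × Char) => ((p.1 : Int), p.2))) =
      (fun (p : Nat × Char) => p.2) from rfl]
    exact pvKp_snd ref.toList 0
  rw [hsnd]
  rw [pvFind_bridge]
  rw [if_neg hfind]
  rw [pvGetD_map_cast, pvGetD_map_cast]
  simp

-- a kept index never sits past the last character; if the reference ends in a non-dash
-- character the side condition at an occurrence flush with the end fails
theorem pvMain (ref q : String) (hnd : ¬ D_ungappedseqsearch ref q) :
    ungappedseqsearch ref q = ungappedseqsearch_alt ref q := by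
  have hA : ungappedseqsearch ref q = pvALoop ref.toList q.toList (ref.toList.length + 1) 0 := rfl
  by_cases hqs : q.toList.filter (· ≠ '-') = []
  · -- no real query characters
    cases hK : pvKp ref.toList 0 with
    | nil =>
      rw [hA, pvALoop_miss ref.toList q.toList (ref.toList.length + 1) 0 ?_,
        pvAlt_gaps_nil ref q hqs hK]
      intro s hs hle
      rw [hK] at hs
      simp at hs
    | cons p rest =>
      have h0 : 0 < (pvKp ref.toList 0).length := by rw [hK]; simp
      have hp : (pvKp ref.toList 0)[0]'h0 = p := by simp [hK]
      have hi0 : ((pvKp ref.toList 0)[0]'h0).1 < ref.toList.length := by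
        obtain ⟨-, hlt, -, -⟩ := pvKp_mem ref.toList 0 _ (List.getElem_mem h0)
        omega
      have hdropne : ref.toList.drop ((pvKp ref.toList 0)[0]'h0).1 ≠ [] := by
        intro hh
        have h2 : ref.toList.length - ((pvKp ref.toList 0)[0]'h0).1 = 0 := by
          rw [← List.length_drop, hh]
          rfl
        omega
      have hsucc : (pvInner2 (ref.toList.drop ((pvKp ref.toList 0)[0]'h0).1) q.toList).2 = q.toList.length := by
        rw [pvInner2_gaps _ q.toList hqs, if_neg hdropne]
      have hval : (pvInner2 (ref.toList.drop ((pvKp ref.toList 0)[0]'h0).1) q.toList).1 = 0 := by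
        rw [pvInner2_gaps _ q.toList hqs]
      have hmin : ∀ s, (hs : s < (pvKp ref.toList 0).length) →
          ((pvKp ref.toList 0)[s]).1 < ((pvKp ref.toList 0)[0]'h0).1 →
          (pvInner2 (ref.toList.drop ((pvKp ref.toList 0)[s]).1) q.toList).2 ≠ q.toList.length := by
        intro s hs hlt
        exfalso
        rcases Nat.eq_zero_or_pos s with hz | hz
        · subst hz; omega
        · have := pvKp_fst_lt ref.toList 0 h0 hs hz
          omega
      rw [hA, pvALoop_hit ref.toList q.toList (ref.toList.length + 1) 0 0 h0 (by omega) (by omega) hsucc hmin,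
        pvAlt_gaps_cons ref q p rest hqs hK]
      rw [hval, hp]
      simp
  · -- the stripped query is nonempty
    have hmpos : 0 < (q.toList.filter (· ≠ '-')).length := List.length_pos_of_ne_nil hqs
    by_cases hfind : PySem.Chars.find (ref.toList.filter (· ≠ '-')) (q.toList.filter (· ≠ '-')) = -1
    · -- no occurrence at all: both sides report failure
      have hninf : ∀ j, ¬ (q.toList.filter (· ≠ '-') <+: (ref.toList.filter (· ≠ '-')).drop j) := by
        intro j hj
        have h1 : PySem.Chars.isIn (q.toList.filter (· ≠ '-')) (ref.toList.filter (· ≠ '-')) = true :=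
          (PySem.Chars.exists_prefix_drop_iff_isIn _ _).mp ⟨j, hj⟩
        rw [PySem.Chars.isIn_iff_infix] at h1
        exact ((PySem.Chars.find_eq_neg_one_iff _ _).mp hfind) h1
      rw [hA, pvALoop_miss ref.toList q.toList (ref.toList.length + 1) 0 ?_,
        pvAlt_find_neg ref q hqs hfind]
      intro s hs hle hsucc
      exact hninf s ((pvSucc_iff ref.toList q.toList s hs hqs).1.mp hsucc).1
    · -- leftmost occurrence exists
      have ht0 : 0 ≤ PySem.Chars.find (ref.toList.filter (· ≠ '-')) (q.toList.filter (· ≠ '-')) := by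
        have := PySem.Chars.neg_one_le_find (ref.toList.filter (· ≠ '-')) (q.toList.filter (· ≠ '-'))
        omega
      obtain ⟨hpre, hfirst⟩ := PySem.Chars.find_spec ht0
      set s0 := (PySem.Chars.find (ref.toList.filter (· ≠ '-')) (q.toList.filter (· ≠ '-'))).toNat with hs0
      have hpl : (q.toList.filter (· ≠ '-')).length ≤ (ref.toList.filter (· ≠ '-')).length - s0 := by
        have h2 := hpre.length_le
        rw [List.length_drop] at h2
        exact h2
      have hKlen : (pvKp ref.toList 0).length = (ref.toList.filter (· ≠ '-')).length :=
        pvKp_length ref.toList 0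
      have hs0K : s0 < (pvKp ref.toList 0).length := by omega
      have hrange : s0 + (q.toList.filter (· ≠ '-')).length - 1 < (pvKp ref.toList 0).length := by omega
      have hcond : q.toList.getLast? = some '-' →
          ((pvKp ref.toList 0).getD (s0 + (q.toList.filter (· ≠ '-')).length - 1) (0, ' ')).1 + 1 <
            ref.toList.length := by
        intro hl
        rw [List.getD_eq_getElem _ _ hrange]
        obtain ⟨-, hltE, hgdE, hndE⟩ :=
          pvKp_mem ref.toList 0 _ (List.getElem_mem hrange)
        simp only [Nat.sub_zero] at hltE hgdE
        by_cases hrl : ref.toList.getLast? = some '-'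
        · have hrne : ref.toList ≠ [] := by
            intro hh; rw [hh] at hrl; simp at hrl
          have hlast : ref.toList.getD (ref.toList.length - 1) ' ' = '-' := by
            rw [List.getLast?_eq_getLast hrne] at hrl
            have := Option.some.inj hrl
            rw [List.getD_eq_getElem _ _ (by
              have := List.length_pos_of_ne_nil hrne; omega)]
            rw [← this, List.getLast_eq_getElem]
          have hne : ((pvKp ref.toList 0)[s0 + (q.toList.filter (· ≠ '-')).length - 1]'hrange).1 ≠
              ref.toList.length - 1 := by
            intro hh
            rw [hh, hlast] at hgdE
            exact hndE hgdE.symm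
          omega
        · -- reference does not end in a dash: D_ would have to hold, so the occurrence
          -- is not flush with the end
          simp only [D_ungappedseqsearch] at hnd
          push_neg at hnd
          have h5 := hnd hqs hl hrl (by omega)
          have hne : s0 + (q.toList.filter (· ≠ '-')).length ≠
              (ref.toList.filter (· ≠ '-')).length := by
            intro hh
            apply h5
            omega
          have hlt2 : s0 + (q.toList.filter (· ≠ '-')).length - 1 <
              (pvKp ref.toList 0).length - 1 := by omega
          have hmono := pvKp_fst_lt ref.toList 0 hrange
            (show s0 + (q.toList.filter (· ≠ '-')).length < (pvKp ref.toList 0).length by omega)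
            (by omega)
          obtain ⟨-, hltF, -, -⟩ := pvKp_mem ref.toList 0 _
            (List.getElem_mem (show s0 + (q.toList.filter (· ≠ '-')).length < (pvKp ref.toList 0).length by omega))
          omega
      have hsucc : (pvInner2 (ref.toList.drop ((pvKp ref.toList 0)[s0]'hs0K).1) q.toList).2 =
          q.toList.length :=
        (pvSucc_iff ref.toList q.toList s0 hs0K hqs).1.mpr ⟨hpre, hcond⟩
      have hmin : ∀ s, (hs : s < (pvKp ref.toList 0).length) →
          ((pvKp ref.toList 0)[s]).1 < ((pvKp ref.toList 0)[s0]'hs0K).1 →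
          (pvInner2 (ref.toList.drop ((pvKp ref.toList 0)[s]).1) q.toList).2 ≠ q.toList.length := by
        intro s hs hlt hsucc'
        have hssmall : s < s0 := by
          rcases Nat.lt_trichotomy s s0 with hc | hc | hc
          · exact hc
          · subst hc; omega
          · have := pvKp_fst_lt ref.toList 0 hs0K hs hc
            omega
        exact hfirst s hssmall ((pvSucc_iff ref.toList q.toList s hs hqs).1.mp hsucc').1
      rw [hA, pvALoop_hit ref.toList q.toList (ref.toList.length + 1) 0 s0 hs0K (by omega) (by omega) hsucc hmin,
        pvAlt_find_pos ref q hqs hfind]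
      have hv := (pvSucc_iff ref.toList q.toList s0 hs0K hqs).2 hsucc
      rw [← hs0, List.getD_eq_getElem _ _ hs0K]
      simp only [List.cons.injEq, and_true]
      first
        | exact ⟨rfl, by omega⟩
        | exact ⟨trivial, by omega⟩
        | omega
        | exact ⟨rfl, by omega, trivial⟩

-- ===== VERDICT (by name: the statement is the Claim_ definition above) =====
theorem ungappedseqsearch_spec : Claim_unchanged_ungappedseqsearch := by
  intro ref q _
  unfold Spec_ungappedseqsearch
  intro hnd
  exact pvMain ref q hnd
theorem ungappedseqsearch_changed : Claim_changed_ungappedseqsearch := by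
  unfold Claim_changed_ungappedseqsearch
  decide
theorem ungappedseqsearch_tight : Claim_exact_ungappedseqsearch := by
  intro ref q _ hD
  obtain ⟨hqs, hl, hrl, hmle, hfeq⟩ := hD
  have hmpos : 0 < (q.toList.filter (· ≠ '-')).length := List.length_pos_of_ne_nil hqs
  have hKlen := pvKp_length ref.toList 0
  have ht0 : 0 ≤ PySem.Chars.find (ref.toList.filter (· ≠ '-')) (q.toList.filter (· ≠ '-')) := by
    rw [hfeq]; omega
  have hfne : PySem.Chars.find (ref.toList.filter (· ≠ '-')) (q.toList.filter (· ≠ '-')) ≠ -1 := by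
    omega
  obtain ⟨hpre, hfirst⟩ := PySem.Chars.find_spec ht0
  set s0 := (PySem.Chars.find (ref.toList.filter (· ≠ '-')) (q.toList.filter (· ≠ '-'))).toNat with hs0
  have hs0v : s0 = (ref.toList.filter (· ≠ '-')).length - (q.toList.filter (· ≠ '-')).length := by
    rw [hs0, hfeq]; omega
  have hrsne : ref.toList.filter (· ≠ '-') ≠ [] := by
    intro hh
    rw [hh] at hmle
    simp only [List.length_nil] at hmle
    omega
  have hrne : ref.toList ≠ [] := by
    intro hh
    rw [hh] at hrsne
    simp at hrsne
  have hrpos : 0 < ref.toList.length := List.length_pos_of_ne_nil hrne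
  obtain ⟨c, hlastK⟩ := pvKp_last ref.toList 0 hrne hrl
  have hKne : pvKp ref.toList 0 ≠ [] := by
    intro hh
    rw [hh] at hlastK
    simp at hlastK
  have hKpos : 0 < (pvKp ref.toList 0).length := List.length_pos_of_ne_nil hKne
  have hlastIdx : ((pvKp ref.toList 0)[(pvKp ref.toList 0).length - 1]'(Nat.sub_lt hKpos Nat.one_pos)).1 =
      ref.toList.length - 1 := by
    have h8 := Option.some.inj ((List.getLast?_eq_some_getLast hKne).symm.trans hlastK)
    first
      | (rw [← List.getLast_eq_getElem hKne, h8]; simp)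
      | (rw [← List.getLast_eq_getElem (h := hKne), h8]; simp)
      | (rw [← List.getLast_eq_getElem, h8]
         · simp
         · exact hKne)
  have hAno : pvALoop ref.toList q.toList (ref.toList.length + 1) 0 = [-1, -1] := by
    apply pvALoop_miss ref.toList q.toList (ref.toList.length + 1) 0
    intro s hs hle hsucc
    obtain ⟨hpre', hcond'⟩ := (pvSucc_iff ref.toList q.toList s hs hqs).1.mp hsucc
    rcases Nat.lt_trichotomy s s0 with hc | hc | hc
    · exact hfirst s hc hpre'
    · have hcond2 := hcond' hl
      have hix : s + (q.toList.filter (· ≠ '-')).length - 1 = (pvKp ref.toList 0).length - 1 := by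
        omega
      rw [hix, List.getD_eq_getElem _ _ (by omega), hlastIdx] at hcond2
      omega
    · have hlen' := hpre'.length_le
      rw [List.length_drop] at hlen'
      omega
  rw [show ungappedseqsearch ref q = pvALoop ref.toList q.toList (ref.toList.length + 1) 0 from rfl,
    hAno, pvAlt_find_pos ref q hqs hfne]
  intro heq
  simp only [List.cons.injEq] at heq
  obtain ⟨h1, -⟩ := heq
  omega
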